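-- pv_equiv track=rewrite | github.com/ljohm86-oss/ail-builder | ail_engine_v5.py | _pick_home_page
-- ===== SOURCE A (Python) =====
-- from typing import Any
--
-- def _pick_home_page(pages: list[dict[str, Any]]) -> dict[str, Any] | None:
--     for page in pages:
--         if str(page.get("name", "")).strip().lower() == "home":
--             return page
--     for page in pages:
--         if str(page.get("path", "")).strip() == "/":
--             return page
--     return pages[0] if pages else None
-- ===== SOURCE B (Python) =====
-- def _pick_home_page(pages):
--     candidate = None
--     for page in pages:
--         if str(page.get("name", "")).strip().lower() == "home":
--             return page
--         if candidate is None and str(page.get("path", "")).strip() == "/":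
--             candidate = page
--     if candidate is not None:
--         return candidate
--     return pages[0] if pages else None
-- ===== Notes on version B (the rewrite author's own statement) =====
-- stated objective: simpler
-- what changed: Replace A's two sequential scans over pages by a single pass that returns immediately on a name match and records the first path='/' page as a candidate, falling back to the candidate / pages[0] / None after the loop.
import Mathlib
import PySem

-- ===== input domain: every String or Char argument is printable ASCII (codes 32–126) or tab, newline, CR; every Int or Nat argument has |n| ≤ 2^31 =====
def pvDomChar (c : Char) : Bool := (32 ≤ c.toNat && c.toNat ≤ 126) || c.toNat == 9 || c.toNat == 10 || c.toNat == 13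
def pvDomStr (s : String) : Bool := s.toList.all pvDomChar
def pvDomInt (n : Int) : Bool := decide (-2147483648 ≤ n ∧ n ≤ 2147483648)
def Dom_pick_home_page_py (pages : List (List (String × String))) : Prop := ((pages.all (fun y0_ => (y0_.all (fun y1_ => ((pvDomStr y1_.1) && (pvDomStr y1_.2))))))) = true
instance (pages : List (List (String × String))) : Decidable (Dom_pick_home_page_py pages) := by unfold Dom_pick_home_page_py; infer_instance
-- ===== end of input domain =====

-- B merges A's two sequential scans into one pass with a path-candidate accumulator; objective: simpler (single loop).

-- ===== PORT A =====
-- page.get(k, "") on the association list (first match, "" if absent); values are strings so str(...) is the identity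
def pvPageGet (page : List (String × String)) (k : String) : String :=
  ((page.find? (fun kv => kv.1 == k)).map (·.2)).getD ""

-- first loop's test: str(page.get("name","")).strip().lower() == "home"
def pvNameHome (page : List (String × String)) : Bool :=
  PySem.Str.lower (PySem.Str.strip (pvPageGet page "name")) == "home"

-- second loop's test: str(page.get("path","")).strip() == "/"
def pvPathSlash (page : List (String × String)) : Bool :=
  PySem.Str.strip (pvPageGet page "path") == "/"

def pick_home_page_py (pages : List (List (String × String))) : Option (List (String × String)) :=
  match pages.find? pvNameHome with          -- first for-loop: return first name match
  | some p => some p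
  | none =>
    match pages.find? pvPathSlash with       -- second for-loop: return first path match
    | some p => some p
    | none => pages.head?                    -- pages[0] if pages else None

-- ===== PORT B =====
-- single loop: immediate return on name match; first path match recorded in `cand`
def pvAltLoop (cand : Option (List (String × String))) :
    List (List (String × String)) → Option (List (String × String))
  | [] => cand
  | p :: rest =>
    if pvNameHome p then some p
    else pvAltLoop (if cand.isNone && pvPathSlash p then some p else cand) rest

def pick_home_page_py_alt (pages : List (List (String × String))) : Option (List (String × String)) :=
  match pvAltLoop none pages with
  | some p => some p
  | none => pages.head?

-- ===== PRECONDITION & SPEC =====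
def Spec_pick_home_page_py (pages : List (List (String × String))) (out : Option (List (String × String))) : Prop := out = pick_home_page_py_alt pages
instance (pages : List (List (String × String))) (out : Option (List (String × String))) : Decidable (Spec_pick_home_page_py pages out) := by unfold Spec_pick_home_page_py; infer_instance

-- ===== CLAIM (what is proved, stated in full; the proofs are below) =====
def Claim_equal_pick_home_page_py : Prop := ∀ (pages : List (List (String × String))), Dom_pick_home_page_py pages → Spec_pick_home_page_py pages (pick_home_page_py pages)

-- ===== LEMMAS AND PROOFS =====
-- loop invariant: the single pass returns the first name match, else the pending candidate, else the first path match
theorem pvAltLoop_eq (pages : List (List (String × String))) :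
    ∀ cand, pvAltLoop cand pages =
      match pages.find? pvNameHome with
      | some p => some p
      | none => match cand with
        | some c => some c
        | none => pages.find? pvPathSlash := by
  induction pages with
  | nil => intro cand; cases cand <;> simp [pvAltLoop]
  | cons p rest ih =>
    intro cand
    by_cases hn : pvNameHome p
    · simp [pvAltLoop, List.find?, hn]
    · cases cand with
      | some c => simp [pvAltLoop, List.find?, hn, ih]
      | none =>
        by_cases hp : pvPathSlash p <;>
          simp [pvAltLoop, List.find?, hn, hp, ih]

-- ===== VERDICT (by name: the statement is the Claim_ definition above) =====
theorem pick_home_page_py_spec : Claim_equal_pick_home_page_py := by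
  intro pages _
  unfold Spec_pick_home_page_py pick_home_page_py pick_home_page_py_alt
  rw [pvAltLoop_eq]
  cases h1 : pages.find? pvNameHome <;> cases h2 : pages.find? pvPathSlash <;> simp
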